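-- pv_equiv track=rewrite | github.com/KotovshchikovAndrey/Pastebin | SlugMicroservice/utils/base62.py | decode_base62
-- ===== SOURCE A (Python) =====
-- BASE62 = "0123456789abcdefghijklmnopqrstuvwxyzABCDEFGHIJKLMNOPQRSTUVWXYZ"
--
-- def decode_base62(string: str) -> int:
--     if not string:
--         raise ValueError("Invalid string argument. Excpected NOT EMPTY string")
--
--     number = 0
--     for index, char in enumerate(string[::-1]):
--         remain = BASE62.find(char)
--         if remain == -1:
--             raise ValueError("Invalid char '%s'" % char)
--
--         number += remain * 62**index
--
--     return number
-- ===== SOURCE B (Python) =====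
-- BASE62 = "0123456789abcdefghijklmnopqrstuvwxyzABCDEFGHIJKLMNOPQRSTUVWXYZ"
-- _DIGIT = {c: i for i, c in enumerate(BASE62)}
--
-- def decode_base62(string: str) -> int:
--     if not string:
--         raise ValueError("Invalid string argument. Excpected NOT EMPTY string")
--     number = 0
--     for char in string:
--         try:
--             digit = _DIGIT[char]
--         except KeyError:
--             raise ValueError("Invalid char '%s'" % char)
--         number = number * 62 + digit
--     return number
-- ===== Notes on version B (the rewrite author's own statement) =====
-- stated objective: faster
-- what changed: Replaces the reversed-enumerate loop that computes 62**index and a linear BASE62.find per character with a left-to-right Horner accumulation (number = number*62 + digit) using a precomputed char->digit dict.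
import Mathlib
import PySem

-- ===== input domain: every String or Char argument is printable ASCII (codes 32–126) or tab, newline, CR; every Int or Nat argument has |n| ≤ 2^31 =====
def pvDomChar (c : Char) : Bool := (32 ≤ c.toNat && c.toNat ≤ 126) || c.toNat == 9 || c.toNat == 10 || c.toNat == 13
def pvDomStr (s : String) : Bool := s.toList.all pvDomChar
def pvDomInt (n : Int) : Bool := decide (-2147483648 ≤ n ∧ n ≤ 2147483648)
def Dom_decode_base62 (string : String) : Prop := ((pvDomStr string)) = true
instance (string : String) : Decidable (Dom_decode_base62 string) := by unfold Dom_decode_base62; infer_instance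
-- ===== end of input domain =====

-- B replaces A's per-index power 62**index and linear BASE62.find with a single
-- left-to-right Horner pass over a precomputed digit dict (faster in a timing run).

-- ===== PORT A =====
def pvB62 : List Char := "0123456789abcdefghijklmnopqrstuvwxyzABCDEFGHIJKLMNOPQRSTUVWXYZ".toList

-- 'for index, char in enumerate(string[::-1]): number += BASE62.find(char) * 62**index'
-- (the 'remain == -1: raise' branch is excluded by Pre_; string[::-1] is .toList.reverse, exact)
def pvALoop (cs : List Char) (index : Nat) (number : Int) : Int :=
  match cs with
  | [] => number
  | c :: rest => pvALoop rest (index + 1) (number + PySem.Chars.find pvB62 [c] * 62 ^ index)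

def decode_base62 (string : String) : Int :=
  pvALoop string.toList.reverse 0 0

-- ===== PORT B =====
-- _DIGIT = {c: i for i, c in enumerate(BASE62)}
def pvDigit : PySem.Dict Char Int :=
  (PySem.List.enumerate pvB62).foldl (fun d p => d.insert p.2 p.1) PySem.Dict.empty

-- 'for char in string: number = number * 62 + _DIGIT[char]'
-- (KeyError on a char outside BASE62 is excluded by Pre_; getD default 0 is never used inside Pre_)
def pvBLoop (cs : List Char) (number : Int) : Int :=
  match cs with
  | [] => number
  | c :: rest => pvBLoop rest (number * 62 + pvDigit.getD c 0)

def decode_base62_alt (string : String) : Int :=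
  pvBLoop string.toList 0

-- ===== PRECONDITION & SPEC =====
-- A raises ValueError on the empty string and on any character outside BASE62; Pre_ excludes exactly those.
def Pre_decode_base62 (string : String) : Prop :=
  string.toList ≠ [] ∧ string.toList.all (fun c => pvB62.contains c) = true
instance (string : String) : Decidable (Pre_decode_base62 string) := by
  unfold Pre_decode_base62; infer_instance
def pvWitness_decode_base62 : String := "Zz9"

def Spec_decode_base62 (string : String) (out : Int) : Prop := out = decode_base62_alt string
instance (string : String) (out : Int) : Decidable (Spec_decode_base62 string out) := by unfold Spec_decode_base62; infer_instance

-- ===== CLAIM (what is proved, stated in full; the proofs are below) =====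
def Claim_equal_decode_base62 : Prop := ∀ (string : String), Dom_decode_base62 string → Pre_decode_base62 string → Spec_decode_base62 string (decode_base62 string)

-- ===== LEMMAS AND PROOFS =====

-- the two per-character lookups agree on every BASE62 character
set_option maxRecDepth 40000 in
theorem find_eq_digit_all :
    pvB62.all (fun c => PySem.Chars.find pvB62 [c] == pvDigit.getD c 0) = true := by rfl

theorem find_eq_digit : ∀ c ∈ pvB62, PySem.Chars.find pvB62 [c] = pvDigit.getD c 0 := by
  intro c hc
  have := List.all_eq_true.mp find_eq_digit_all c hc
  exact eq_of_beq this

theorem pvALoop_append (xs : List Char) (c : Char) (idx : Nat) (n : Int) :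
    pvALoop (xs ++ [c]) idx n
      = pvALoop xs idx n + PySem.Chars.find pvB62 [c] * 62 ^ (idx + xs.length) := by
  induction xs generalizing idx n with
  | nil => simp [pvALoop]
  | cons x t ih =>
      simp only [List.cons_append, pvALoop, ih, List.length_cons]
      ring_nf

theorem pvBLoop_shift (cs : List Char) (n : Int) :
    pvBLoop cs n = n * 62 ^ cs.length + pvBLoop cs 0 := by
  induction cs generalizing n with
  | nil => simp [pvBLoop]
  | cons c t ih =>
      simp only [pvBLoop, List.length_cons]
      rw [ih (n * 62 + pvDigit.getD c 0), ih (0 * 62 + pvDigit.getD c 0)]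
      ring

theorem loops_agree (cs : List Char) (h : ∀ c ∈ cs, c ∈ pvB62) :
    pvALoop cs.reverse 0 0 = pvBLoop cs 0 := by
  induction cs with
  | nil => rfl
  | cons c t ih =>
      have hc : c ∈ pvB62 := h c (List.mem_cons_self ..)
      have ht : ∀ x ∈ t, x ∈ pvB62 := fun x hx => h x (List.mem_cons_of_mem _ hx)
      simp only [List.reverse_cons, pvALoop_append, ih ht, find_eq_digit c hc,
        List.length_reverse, pvBLoop]
      rw [pvBLoop_shift t (0 * 62 + pvDigit.getD c 0)]
      ring

-- ===== VERDICT (by name: the statement is the Claim_ definition above) =====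
theorem decode_base62_spec : Claim_equal_decode_base62 := by
  intro s _ hpre
  unfold Spec_decode_base62 decode_base62 decode_base62_alt
  exact loops_agree s.toList
    (fun c hc => List.contains_iff_mem.mp (List.all_eq_true.mp hpre.2 c hc))
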